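-- pv_equiv track=rewrite | github.com/Anokeye/Embossing | SistekConversion.py | convert_to_sistek
-- ===== SOURCE A (Python) =====
-- def convert_to_sistek(list_of_euronet_lines):
--     """Accepts the contents of the Euronet file and returns Sistek Records """
--
--     sistek_records_list = []
--     euronet_record = []
--     file_header = "Card_Number,Exp_Date,Customer_Name,Offset,ISO_Name"
--     end_of_record_marker = "#END#"
--
--     sistek_records_list.append(file_header)
--
--     for line in list_of_euronet_lines:
--         euronet_record.append(line)
--         if end_of_record_marker in line:
--             sistek_record = make_sistek_record(euronet_record)
--             sistek_records_list.append(sistek_record)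
--             euronet_record.clear()
--             euronet_record.append(line)
--
--     return sistek_records_list
--
-- def make_sistek_record(euronet_record):
--     card_number = get_card_number(euronet_record[0])
--     expiry_date = get_expiry_date(euronet_record[1])
--     full_name = get_full_name(euronet_record[2])
--     offset = "0000"
--     delimeter = ","
--     iso_name = get_iso_name(euronet_record[5])
--     record = [card_number, expiry_date, full_name, offset, iso_name]
--
--     sistek_record = delimeter.join(record)
--
--     return sistek_record
--
-- def get_iso_name(input_line):
--     delimeter = '^'
--     start_of_name = input_line.index(delimeter) + 1
--     end_of_name = input_line.index(delimeter, start_of_name)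
--
--     return input_line[start_of_name:end_of_name]
--
-- def get_full_name(input_line):
--     return input_line.strip()
--
-- def get_expiry_date(input_line):
--     return input_line[0:8]
--
-- def get_card_number(input_line):
--     card_length = 16
--     card_delimeter = '$'
--     start_of_card = input_line.index(card_delimeter) + 1
--     card_number = input_line[start_of_card:start_of_card + card_length]
--
--     return card_number
-- ===== SOURCE B (Python) =====
-- def convert_to_sistek(list_of_euronet_lines):
--     """Accepts the contents of the Euronet file and returns Sistek Records """
--     positions = [i for i, line in enumerate(list_of_euronet_lines) if "#END#" in line]
--     groups = [list_of_euronet_lines[s:e + 1] for s, e in zip([0] + positions, positions)]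
--     return ["Card_Number,Exp_Date,Customer_Name,Offset,ISO_Name"] + [format_record(g) for g in groups]
--
-- def format_record(group):
--     after_dollar = group[0][group[0].find('$') + 1:]
--     caret_tail = group[5][group[5].find('^') + 1:]
--     return (after_dollar[:16] + "," + group[1][:8] + "," + group[2].strip()
--             + ",0000," + caret_tail[:caret_tail.find('^')])
-- ===== Notes on version B (the rewrite author's own statement) =====
-- stated objective: alternative
-- what changed: Replaces A's single-pass accumulate-and-clear loop and its four field-helper functions by first computing the marker-line positions, slicing each record group out of the input with zip([0]+positions, positions), and building each record by string concatenation over two-stage slices (tail after the delimiter, then a prefix) instead of join over index-computed slices.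
import Mathlib
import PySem

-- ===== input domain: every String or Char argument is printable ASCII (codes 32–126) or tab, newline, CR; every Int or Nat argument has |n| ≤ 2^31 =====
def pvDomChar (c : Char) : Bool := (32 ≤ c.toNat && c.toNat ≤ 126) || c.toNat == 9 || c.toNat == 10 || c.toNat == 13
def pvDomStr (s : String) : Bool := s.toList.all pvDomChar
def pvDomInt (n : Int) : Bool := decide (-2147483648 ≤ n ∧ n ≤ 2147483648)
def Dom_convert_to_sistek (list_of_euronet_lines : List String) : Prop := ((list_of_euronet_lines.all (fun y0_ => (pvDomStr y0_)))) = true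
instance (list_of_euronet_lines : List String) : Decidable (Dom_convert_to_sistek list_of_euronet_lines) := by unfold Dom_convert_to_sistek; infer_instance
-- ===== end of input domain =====

-- B replaces A's accumulate-and-clear loop and its four field-helper functions by computing the
-- marker positions once, slicing the groups out of the input, and building each record by string
-- concatenation over two-stage slices (objective: alternative decomposition, no speed claim).

-- ===== PORT A =====
-- transliterations of A's module helpers get_card_number / get_expiry_date / get_full_name /
-- get_iso_name / make_sistek_record. str.index raises ValueError where find = -1; Pre_ excludes
-- those inputs (the slice-from-0 value of the total rendering is never reached inside Pre_).
def get_card_number (input_line : String) : String :=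
  let start_of_card : Int := PySem.Str.find input_line "$" + 1
  PySem.Str.slice input_line (some start_of_card) (some (start_of_card + 16))

def get_expiry_date (input_line : String) : String :=
  PySem.Str.slice input_line (some 0) (some 8)

def get_full_name (input_line : String) : String :=
  PySem.Str.strip input_line

def get_iso_name (input_line : String) : String :=
  let start_of_name : Int := PySem.Str.find input_line "^" + 1
  let end_of_name : Int := PySem.Str.findFrom input_line "^" start_of_name none
  PySem.Str.slice input_line (some start_of_name) (some end_of_name)

-- euronet_record[i]: IndexError (record shorter than 6 lines) is excluded by Pre_
def make_sistek_record (euronet_record : List String) : String :=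
  let card_number := get_card_number (PySem.List.pyGetD euronet_record 0 "")
  let expiry_date := get_expiry_date (PySem.List.pyGetD euronet_record 1 "")
  let full_name := get_full_name (PySem.List.pyGetD euronet_record 2 "")
  let iso_name := get_iso_name (PySem.List.pyGetD euronet_record 5 "")
  PySem.Str.join "," [card_number, expiry_date, full_name, "0000", iso_name]

-- A: one pass, appending each line to euronet_record; on a marker line emit the record and
-- re-seed the accumulator with the marker line.
def convert_to_sistek (list_of_euronet_lines : List String) : List String :=
  (list_of_euronet_lines.foldl
    (fun (st : List String × List String) (line : String) =>
      let euronet_record := st.2 ++ [line]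
      if PySem.Str.isIn "#END#" line then
        (st.1 ++ [make_sistek_record euronet_record], [line])
      else
        (st.1, euronet_record))
    (["Card_Number,Exp_Date,Customer_Name,Offset,ISO_Name"], [])).1

-- ===== PORT B =====
-- B's record builder: two-stage slices ('tail after the delimiter, then a prefix of it') found
-- with str.find, glued by string concatenation.
def format_record (group : List String) : String :=
  let after_dollar :=
    PySem.Str.slice (PySem.List.pyGetD group 0 "")
      (some (PySem.Str.find (PySem.List.pyGetD group 0 "") "$" + 1)) none
  let caret_tail :=
    PySem.Str.slice (PySem.List.pyGetD group 5 "")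
      (some (PySem.Str.find (PySem.List.pyGetD group 5 "") "^" + 1)) none
  PySem.Str.slice after_dollar none (some 16) ++ "," ++
    PySem.Str.slice (PySem.List.pyGetD group 1 "") none (some 8) ++ "," ++
    PySem.Str.strip (PySem.List.pyGetD group 2 "") ++ ",0000," ++
    PySem.Str.slice caret_tail none (some (PySem.Str.find caret_tail "^"))

def convert_to_sistek_alt (list_of_euronet_lines : List String) : List String :=
  let positions : List Int :=
    ((PySem.List.enumerate list_of_euronet_lines).filter
      (fun p => PySem.Str.isIn "#END#" p.2)).map (·.1)
  let groups : List (List String) :=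
    (((0 : Int) :: positions).zip positions).map
      (fun se => PySem.List.slice list_of_euronet_lines (some se.1) (some (se.2 + 1)))
  "Card_Number,Exp_Date,Customer_Name,Offset,ISO_Name" :: groups.map format_record

-- ===== PRECONDITION & SPEC =====
-- marker positions (0-based indices of lines containing "#END#"), stated structurally
def markPos : List String → List Nat
  | [] => []
  | l :: ls =>
    if PySem.Str.isIn "#END#" l then 0 :: (markPos ls).map (· + 1)
    else (markPos ls).map (· + 1)

-- Pre_ excludes exactly the inputs on which Python A raises: each record group (from one marker
-- to the next, inclusive) must have ≥ 6 lines (else IndexError), a '$' in its first line and a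
-- second '^' after the first in its sixth line (else str.index raises ValueError).
def Pre_convert_to_sistek (list_of_euronet_lines : List String) : Prop :=
  ∀ se ∈ ((0 :: markPos list_of_euronet_lines).zip (markPos list_of_euronet_lines)),
    6 ≤ (List.take (se.2 + 1 - se.1) (List.drop se.1 list_of_euronet_lines)).length ∧
    PySem.Str.isIn "$"
      (PySem.List.pyGetD (List.take (se.2 + 1 - se.1) (List.drop se.1 list_of_euronet_lines)) 0 "") = true ∧
    PySem.Str.isIn "^"
      (PySem.List.pyGetD (List.take (se.2 + 1 - se.1) (List.drop se.1 list_of_euronet_lines)) 5 "") = true ∧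
    PySem.Str.findFrom
      (PySem.List.pyGetD (List.take (se.2 + 1 - se.1) (List.drop se.1 list_of_euronet_lines)) 5 "") "^"
      (PySem.Str.find
        (PySem.List.pyGetD (List.take (se.2 + 1 - se.1) (List.drop se.1 list_of_euronet_lines)) 5 "") "^" + 1)
      none ≠ -1
instance (list_of_euronet_lines : List String) : Decidable (Pre_convert_to_sistek list_of_euronet_lines) := by
  unfold Pre_convert_to_sistek; infer_instance

def pvWitness_convert_to_sistek : List String :=
  ["ab$1234567890123456", "20251231", " John Doe ", "x", "y", "AA^BANK^BB #END#", "trailing"]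

def Spec_convert_to_sistek (list_of_euronet_lines : List String) (out : List String) : Prop := out = convert_to_sistek_alt list_of_euronet_lines
instance (list_of_euronet_lines : List String) (out : List String) : Decidable (Spec_convert_to_sistek list_of_euronet_lines out) := by unfold Spec_convert_to_sistek; infer_instance

-- ===== CLAIM (what is proved, stated in full; the proofs are below) =====
def Claim_equal_convert_to_sistek : Prop := ∀ (list_of_euronet_lines : List String), Dom_convert_to_sistek list_of_euronet_lines → Pre_convert_to_sistek list_of_euronet_lines → Spec_convert_to_sistek list_of_euronet_lines (convert_to_sistek list_of_euronet_lines)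

-- ===== LEMMAS AND PROOFS =====

-- A's groups, as a recursion over the lines with the pending accumulator explicit
def groupsRec : List String → List String → List (List String)
  | [], _ => []
  | l :: ls, acc =>
    if PySem.Str.isIn "#END#" l then (acc ++ [l]) :: groupsRec ls [l]
    else groupsRec ls (acc ++ [l])

theorem foldA_eq (ls : List String) : ∀ (recs acc : List String),
    (ls.foldl
      (fun (st : List String × List String) (line : String) =>
        let euronet_record := st.2 ++ [line]
        if PySem.Str.isIn "#END#" line then
          (st.1 ++ [make_sistek_record euronet_record], [line])
        else
          (st.1, euronet_record))
      (recs, acc)).1 = recs ++ (groupsRec ls acc).map make_sistek_record := by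
  induction ls with
  | nil => intro recs acc; simp [groupsRec]
  | cons l ls ih =>
    intro recs acc
    by_cases h : PySem.Str.isIn "#END#" l
    · simp only [List.foldl_cons, groupsRec, h, if_true, ih, List.map_cons, List.append_assoc,
        List.singleton_append]
    · simp only [List.foldl_cons, groupsRec, h, Bool.false_eq_true, if_false, ih]

theorem positionsB_eq (ls : List String) : ∀ (s : Int),
    ((PySem.List.enumerate ls s).filter (fun p => PySem.Str.isIn "#END#" p.2)).map (·.1)
      = (markPos ls).map (fun n : Nat => s + (n : Int)) := by
  induction ls with
  | nil => intro s; simp [PySem.List.enumerate_nil, markPos]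
  | cons l ls ih =>
    intro s
    rw [PySem.List.enumerate_cons, List.filter_cons]
    by_cases h : PySem.Str.isIn "#END#" l
    · simp only [markPos, h, if_true, List.map_cons, ih (s + 1), List.map_map]
      refine congrArg₂ _ (by norm_num) ?_
      exact List.map_congr_left (fun n _ => by simp only [Function.comp_apply]; push_cast; ring)
    · simp only [markPos, h, Bool.false_eq_true, if_false, ih (s + 1), List.map_map]
      exact List.map_congr_left (fun n _ => by simp only [Function.comp_apply]; push_cast; ring)

theorem groupsRec_eq_slices (ls : List String) : ∀ (pre : List String) (s : Nat), s ≤ pre.length →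
    groupsRec ls (pre.drop s)
      = ((((s : Nat) : Int) :: (markPos ls).map (fun n : Nat => ((pre.length + n : Nat) : Int))).zip
          ((markPos ls).map (fun n : Nat => ((pre.length + n : Nat) : Int)))).map
          (fun se => PySem.List.slice (pre ++ ls) (some se.1) (some (se.2 + 1))) := by
  induction ls with
  | nil => intro pre s hs; simp [groupsRec, markPos]
  | cons l ls ih =>
    intro pre s hs
    have hfun : (fun n : Nat => ((pre.length + n : Nat) : Int)) ∘ (· + 1)
        = fun n : Nat => (((pre ++ [l]).length + n : Nat) : Int) := by
      funext n; simp only [Function.comp_apply, List.length_append, List.length_cons,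
        List.length_nil]; push_cast; ring
    by_cases h : PySem.Str.isIn "#END#" l
    · have hdrop : [l] = (pre ++ [l]).drop pre.length := by simp
      simp only [groupsRec, markPos, h, if_true, List.map_cons, List.map_map, List.zip_cons_cons,
        Nat.add_zero]
      rw [hdrop, ih (pre ++ [l]) pre.length (by simp), ← hdrop, hfun, ← List.append_cons]
      congr 1
      have hc : ((pre.length : Int) + 1) = ((pre.length + 1 : Nat) : Int) := by push_cast; ring
      rw [hc, PySem.List.slice_natCast, List.drop_append_of_le_length hs]
      have h2 : pre.length + 1 - s = (List.drop s pre).length + 1 := by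
        simp only [List.length_drop]; omega
      rw [h2]
      rw [List.take_append]
      simp
    · have hdrop : pre.drop s ++ [l] = (pre ++ [l]).drop s := by
        rw [List.drop_append_of_le_length hs]
      simp only [groupsRec, markPos, h, Bool.false_eq_true, if_false, List.map_map]
      rw [hdrop, ih (pre ++ [l]) s (by simp; omega), hfun, ← List.append_cons]

-- join with "," of the five fields is the concatenation B writes out
theorem join_comma (a b c e : String) :
    PySem.Str.join "," [a, b, c, "0000", e] = a ++ "," ++ b ++ "," ++ c ++ ",0000," ++ e := by
  apply String.toList_inj.mp
  simp [PySem.Str.toList_join, PySem.Chars.join, List.intercalate]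

theorem exp_eq (s : String) : get_expiry_date s = PySem.Str.slice s none (some 8) := by
  apply String.toList_inj.mp
  simp [get_expiry_date]

theorem card_eq (s : String) (h : PySem.Str.isIn "$" s = true) :
    get_card_number s
      = PySem.Str.slice (PySem.Str.slice s (some (PySem.Str.find s "$" + 1)) none) none (some 16) := by
  apply String.toList_inj.mp
  simp only [get_card_number, PySem.Str.toList_slice, PySem.Chars.slice_eq_listSlice,
    PySem.Str.find_eq, PySem.Str.isIn_eq] at *
  have hf : 0 ≤ PySem.Chars.find s.toList "$".toList :=
    (PySem.Chars.find_nonneg_iff _ _).mpr ((PySem.Chars.isIn_iff_infix _ _).mp h)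
  obtain ⟨k, hk⟩ : ∃ k : Nat, PySem.Chars.find s.toList "$".toList = (k : Int) :=
    ⟨(PySem.Chars.find s.toList "$".toList).toNat, by omega⟩
  rw [hk]
  have h1 : ((k : Int) + 1) = ((k + 1 : Nat) : Int) := by push_cast; ring
  rw [h1, show (((k + 1 : Nat) : Int) + 16) = (((k + 1 : Nat) : Int) + ((16 : Nat) : Int)) from by norm_num,
    PySem.List.slice_natCast_add, PySem.List.slice_from_natCast,
    PySem.List.slice_to (s.toList.drop (k + 1)) (show (0:Int) ≤ 16 from by norm_num)]
  simp

theorem iso_eq (s : String) (h1 : PySem.Str.isIn "^" s = true)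
    (h2 : PySem.Str.findFrom s "^" (PySem.Str.find s "^" + 1) none ≠ -1) :
    get_iso_name s
      = PySem.Str.slice (PySem.Str.slice s (some (PySem.Str.find s "^" + 1)) none) none
          (some (PySem.Str.find (PySem.Str.slice s (some (PySem.Str.find s "^" + 1)) none) "^")) := by
  apply String.toList_inj.mp
  simp only [get_iso_name, PySem.Str.toList_slice, PySem.Chars.slice_eq_listSlice,
    PySem.Str.find_eq, PySem.Str.isIn_eq, PySem.Str.findFrom_eq] at *
  have hinf : "^".toList <:+: s.toList := (PySem.Chars.isIn_iff_infix _ _).mp h1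
  have hf : 0 ≤ PySem.Chars.find s.toList "^".toList :=
    (PySem.Chars.find_nonneg_iff _ _).mpr hinf
  have hne : PySem.Chars.findFrom s.toList "^".toList ((0 : Nat) : Int) none ≠ -1 := by
    simpa [PySem.Chars.findFrom_zero] using (PySem.Chars.find_ne_neg_one_iff s.toList "^".toList).mpr hinf
  have hspec := PySem.Chars.findFrom_natCast_spec s.toList "^".toList 0 (Nat.zero_le _) hne
  simp only [Nat.cast_zero, PySem.Chars.findFrom_zero] at hspec
  have hlt : (PySem.Chars.find s.toList "^".toList).toNat < s.toList.length := by
    have hlen := hspec.2.1.length_le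
    have hpos : 0 < "^".toList.length := by decide
    simp only [List.length_drop] at hlen
    omega
  obtain ⟨k, hk⟩ : ∃ k : Nat, PySem.Chars.find s.toList "^".toList = (k : Int) :=
    ⟨(PySem.Chars.find s.toList "^".toList).toNat, by omega⟩
  rw [hk] at hlt ⊢ h2
  simp only [Int.toNat_natCast] at hlt
  have hc : ((k : Int) + 1) = ((k + 1 : Nat) : Int) := by push_cast; ring
  rw [hc] at h2 ⊢
  rw [PySem.Chars.findFrom_natCast s.toList "^".toList (k + 1) (by omega)] at h2 ⊢
  rw [PySem.List.slice_from_natCast]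
  by_cases hcase : PySem.Chars.find (s.toList.drop (k + 1)) "^".toList = -1
  · rw [if_pos hcase] at h2
    exact absurd rfl h2
  · obtain ⟨m, hm⟩ : ∃ m : Nat, PySem.Chars.find (s.toList.drop (k + 1)) "^".toList = (m : Int) := by
      have htn : 0 ≤ PySem.Chars.find (s.toList.drop (k + 1)) "^".toList :=
        (PySem.Chars.find_nonneg_iff _ _).mpr ((PySem.Chars.find_ne_neg_one_iff _ _).mp hcase)
      exact ⟨(PySem.Chars.find (s.toList.drop (k + 1)) "^".toList).toNat, by omega⟩
    rw [if_neg hcase, hm, PySem.List.slice_natCast_add, PySem.List.slice_to_natCast]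

-- on a group whose first line has a '$' and whose sixth line has a second '^', A's joined record
-- equals B's concatenated record
theorem record_eq (g : List String)
    (hd : PySem.Str.isIn "$" (PySem.List.pyGetD g 0 "") = true)
    (hc1 : PySem.Str.isIn "^" (PySem.List.pyGetD g 5 "") = true)
    (hc2 : PySem.Str.findFrom (PySem.List.pyGetD g 5 "") "^"
      (PySem.Str.find (PySem.List.pyGetD g 5 "") "^" + 1) none ≠ -1) :
    make_sistek_record g = format_record g := by
  unfold make_sistek_record format_record
  rw [join_comma, card_eq _ hd, iso_eq _ hc1 hc2, exp_eq]
  rfl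

-- ===== VERDICT (by name: the statement is the Claim_ definition above) =====
set_option maxHeartbeats 1000000 in
theorem convert_to_sistek_spec : Claim_equal_convert_to_sistek := by
  intro ls _ hpre
  show convert_to_sistek ls = convert_to_sistek_alt ls
  have hgrp := groupsRec_eq_slices ls [] 0 (by simp)
  simp only [List.drop_nil, List.length_nil, List.nil_append, Nat.cast_zero, Nat.zero_add] at hgrp
  have hzip : ((0 : Int) :: (markPos ls).map (fun n : Nat => (n : Int))).zip
        ((markPos ls).map (fun n : Nat => (n : Int)))
      = ((0 :: markPos ls).zip (markPos ls)).map
          (Prod.map (fun n : Nat => (n : Int)) (fun n : Nat => (n : Int))) := by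
    rw [show ((0 : Int) :: (markPos ls).map (fun n : Nat => (n : Int)))
        = (0 :: markPos ls).map (fun n : Nat => (n : Int)) from by simp,
      List.zip_map]
  simp only [convert_to_sistek, convert_to_sistek_alt, foldA_eq, positionsB_eq ls 0, hgrp,
    List.map_map, List.singleton_append, zero_add, hzip]
  refine congrArg _ (List.map_congr_left ?_)
  rintro ⟨a, b⟩ hse
  obtain ⟨h6, hd, hc1, hc2⟩ := hpre (a, b) hse
  have hslice : PySem.List.slice ls (some ((a : Nat) : Int)) (some (((b : Nat) : Int) + 1))
      = List.take (b + 1 - a) (List.drop a ls) := by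
    rw [show (((b : Nat) : Int) + 1) = ((b + 1 : Nat) : Int) from by push_cast; ring,
      PySem.List.slice_natCast]
  show make_sistek_record (PySem.List.slice ls (some ((a : Nat) : Int)) (some (((b : Nat) : Int) + 1)))
      = format_record (PySem.List.slice ls (some ((a : Nat) : Int)) (some (((b : Nat) : Int) + 1)))
  rw [hslice]
  exact record_eq _ hd hc1 hc2
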